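-- pv_equiv track=rewrite | github.com/kudinov-prog/Checkio | Oreilly/Cipher Map.py | recall_password
-- ===== SOURCE A (Python) =====
-- def recall_password(data, ciphered_password):
--     summ_iter = [list(data)]
--     def rotatematrix(data):
--         newdata = []
--         for i in range(len(data[0])):
--             newrow = [data[j][i] for j in range(len(data))][::-1]
--             newdata.append(''.join(newrow))
--         summ_iter.append(newdata)
--
--     final_pass = []
--     def split(data, ciphered_password):
--         new_data = []
--         new_password = []
--         for i in data:
--             for j in i:
--                 new_data.append(j)
--         for f in ciphered_password:
--             for k in f:
--                 new_password.append(k)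
--         for i in range(len(new_data)):
--             if new_data[i] == 'X':
--                 final_pass.append(new_password[i])
--
--     def main():
--         i = 0
--         while i <= 2:
--             rotatematrix(summ_iter[i])
--             i += 1
--         z = 0
--         while z < 4:
--             split(summ_iter[z], ciphered_password)
--             z += 1
--         return ''.join(final_pass)
--
--     return main()
-- ===== SOURCE B (Python) =====
-- def recall_password(data, ciphered_password):
--     # Coordinate-transform approach: never build rotated grids.  Orientation 0 is a
--     # direct scan of the flattened data; the three rotations map each cell of the
--     # rotated orientation back to the original grid by a closed-form transform.
--     P = ''.join(ciphered_password)
--     out = [P[i] for i, c in enumerate(''.join(data)) if c == 'X']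
--     n = len(data)
--     m = len(data[0])
--     for (R, C, f) in (
--         (m, n, lambda i, j: (n - 1 - j, i)),
--         (n, m, lambda i, j: (n - 1 - i, m - 1 - j)),
--         (m, n, lambda i, j: (j, m - 1 - i)),
--     ):
--         for i in range(R):
--             for j in range(C):
--                 a, b = f(i, j)
--                 if data[a][b] == 'X':
--                     out.append(P[i * C + j])
--     return ''.join(out)
-- ===== Notes on version B (the rewrite author's own statement) =====
-- stated objective: alternative
-- what changed: B never materialises the three rotated grids: it flattens the password once, scans the flattened data directly for orientation 0, and for each of the three rotations enumerates cells in row-major order mapping each back to the original grid by a closed-form 90-degree coordinate transform, reading characters only from the original data.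
import Mathlib
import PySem

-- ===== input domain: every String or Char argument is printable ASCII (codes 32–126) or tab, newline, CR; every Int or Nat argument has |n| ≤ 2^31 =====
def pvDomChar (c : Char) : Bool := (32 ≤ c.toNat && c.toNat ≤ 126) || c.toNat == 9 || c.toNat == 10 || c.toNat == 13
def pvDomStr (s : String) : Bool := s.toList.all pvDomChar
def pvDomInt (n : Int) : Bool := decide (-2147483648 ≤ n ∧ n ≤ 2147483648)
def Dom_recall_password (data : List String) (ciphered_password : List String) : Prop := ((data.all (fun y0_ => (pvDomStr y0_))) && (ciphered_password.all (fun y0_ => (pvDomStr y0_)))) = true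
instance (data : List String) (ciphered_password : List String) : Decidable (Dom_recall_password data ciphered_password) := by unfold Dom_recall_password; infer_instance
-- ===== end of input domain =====

-- B replaces A's explicitly built rotated grids by a closed-form 90°-rotation coordinate
-- transform reading the original grid directly (alternative decomposition, same cost).


-- ===== PORT A =====
-- A's rotatematrix: new row i is column i of the grid, reversed (clockwise rotation).
-- Defaults ' '/[] stand where Python raises IndexError; Pre_ excludes those inputs.
def pvRotA (g : List (List Char)) : List (List Char) :=
  (List.range (g.headD []).length).map (fun i =>
    ((List.range g.length).map (fun j => ((g.getD j []).getD i ' '))).reverse)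

-- A's split: flatten the grid, and for each flat index holding 'X' take the password char there.
def pvSplitA (pw : List Char) (g : List (List Char)) : List Char :=
  (List.range g.flatten.length).filterMap (fun i =>
    if g.flatten.getD i ' ' = 'X' then some (pw.getD i ' ') else none)

def recall_password (data : List String) (ciphered_password : List String) : String :=
  let g0 := data.map String.toList
  -- main's first while loop (i = 0,1,2) appends three rotations to summ_iter:
  let g1 := pvRotA g0
  let g2 := pvRotA g1
  let g3 := pvRotA g2
  let pw := (ciphered_password.map String.toList).flatten
  -- main's second while loop (z = 0..3) calls split on each grid, accumulating final_pass:
  String.ofList (pvSplitA pw g0 ++ pvSplitA pw g1 ++ pvSplitA pw g2 ++ pvSplitA pw g3)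

-- ===== PORT B =====
-- B helper: data[a][b] on the original grid.
def pvCell (g : List (List Char)) (a b : Nat) : Char := (g.getD a []).getD b ' '

-- B helper: enumerate an R×C orientation row-major; f maps a cell back to original coordinates.
def pvPick (pw : List Char) (g : List (List Char)) (f : Nat → Nat → Nat × Nat) (R C : Nat) : List Char :=
  (List.range R).flatMap (fun i =>
    (List.range C).filterMap (fun j =>
      if pvCell g (f i j).1 (f i j).2 = 'X' then some (pw.getD (i * C + j) ' ') else none))

def recall_password_alt (data : List String) (ciphered_password : List String) : String :=
  let g := data.map String.toList
  let pw := (ciphered_password.map String.toList).flatten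
  -- orientation 0: [P[i] for i, c in enumerate(''.join(data)) if c == 'X']
  let first := (PySem.List.enumerate g.flatten 0).filterMap (fun p =>
    if p.2 = 'X' then some (pw.getD p.1.toNat ' ') else none)
  let n := g.length
  let m := (g.headD []).length
  String.ofList (first
          ++ pvPick pw g (fun i j => (n - 1 - j, i)) m n
          ++ pvPick pw g (fun i j => (n - 1 - i, m - 1 - j)) n m
          ++ pvPick pw g (fun i j => (j, m - 1 - i)) m n)

-- ===== PRECONDITION & SPEC =====
-- Pre_ excludes exactly the inputs on which Python A raises IndexError: an empty grid,
-- an empty first row, a row shorter than the first, or an 'X' whose flat index in some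
-- orientation reaches past the flattened password.
def Pre_recall_password (data : List String) (ciphered_password : List String) : Prop :=
  data ≠ [] ∧ (data.headD "").toList.length ≠ 0 ∧
  (∀ s ∈ data, (data.headD "").toList.length ≤ s.toList.length) ∧
  (∀ p ∈ List.range ((data.map String.toList).flatten).length,
    ((data.map String.toList).flatten).getD p ' ' = 'X' →
      p < ((ciphered_password.map String.toList).flatten).length) ∧
  (∀ i ∈ List.range data.length, ∀ j ∈ List.range (data.headD "").toList.length,
    ((data.map String.toList).getD i []).getD j ' ' = 'X' →
      (let n := data.length
       let m := (data.headD "").toList.length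
       let L := ((ciphered_password.map String.toList).flatten).length
       j * n + (n - 1 - i) < L ∧
       (n - 1 - i) * m + (m - 1 - j) < L ∧ (m - 1 - j) * n + i < L))
instance (data : List String) (ciphered_password : List String) : Decidable (Pre_recall_password data ciphered_password) := by unfold Pre_recall_password; infer_instance

def pvWitness_recall_password : List String × List String := (["XO", "OX"], ["ab", "cd"])

def Spec_recall_password (data : List String) (ciphered_password : List String) (out : String) : Prop := out = recall_password_alt data ciphered_password
instance (data : List String) (ciphered_password : List String) (out : String) : Decidable (Spec_recall_password data ciphered_password out) := by unfold Spec_recall_password; infer_instance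

-- ===== CLAIM (what is proved, stated in full; the proofs are below) =====
def Claim_equal_recall_password : Prop := ∀ (data : List String) (ciphered_password : List String), Dom_recall_password data ciphered_password → Pre_recall_password data ciphered_password → Spec_recall_password data ciphered_password (recall_password data ciphered_password)

-- ===== LEMMAS AND PROOFS =====

-- a grid given by a cell function: R rows of C columns
def pvGrid (cf : Nat → Nat → Char) (R C : Nat) : List (List Char) :=
  (List.range R).map (fun i => (List.range C).map (fun j => cf i j))

-- A's split with an offset into the password (generalisation for the flatten induction)
def pvSplitOff (pw : List Char) (nd : List Char) (off : Nat) : List Char :=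
  (List.range nd.length).filterMap (fun i =>
    if nd.getD i ' ' = 'X' then some (pw.getD (off + i) ' ') else none)

theorem pvGrid_length (cf : Nat → Nat → Char) (R C : Nat) : (pvGrid cf R C).length = R := by
  simp [pvGrid]

theorem pvGrid_head (cf : Nat → Nat → Char) (R C : Nat) (hR : 0 < R) :
    ((pvGrid cf R C).headD []).length = C := by
  cases R with
  | zero => omega
  | succ R => simp [pvGrid, List.range_succ_eq_map]

theorem pvGrid_cell (cf : Nat → Nat → Char) (R C a b : Nat) (ha : a < R) (hb : b < C) :
    pvCell (pvGrid cf R C) a b = cf a b := by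
  simp [pvCell, pvGrid, List.getD_eq_getElem?_getD, ha, hb]

theorem revMapRange {α : Type} (n : Nat) (f : Nat → α) :
    ((List.range n).map f).reverse = (List.range n).map (fun j => f (n - 1 - j)) := by
  apply List.ext_getElem
  · simp
  · intro i h1 h2
    simp only [List.getElem_reverse, List.getElem_map, List.getElem_range,
      List.length_map, List.length_range] at *

theorem rotA_eq (g : List (List Char)) (n m : Nat) (hn : g.length = n)
    (hm : (g.headD []).length = m) :
    pvRotA g = pvGrid (fun i j => pvCell g (n - 1 - j) i) m n := by
  unfold pvRotA pvGrid pvCell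
  rw [hm, hn]
  refine List.map_congr_left ?_
  intro i _
  exact revMapRange n _

theorem splitA_eq_off (pw : List Char) (g : List (List Char)) :
    pvSplitA pw g = pvSplitOff pw g.flatten 0 := by
  simp [pvSplitA, pvSplitOff]

theorem splitOff_append (pw a b : List Char) (off : Nat) :
    pvSplitOff pw (a ++ b) off = pvSplitOff pw a off ++ pvSplitOff pw b (off + a.length) := by
  unfold pvSplitOff
  rw [List.length_append, List.range_add, List.filterMap_append, List.filterMap_map]
  congr 1
  · refine List.filterMap_congr ?_
    intro i hi
    have h : i < a.length := List.mem_range.mp hi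
    rw [List.getD_append _ _ _ _ h]
  · refine List.filterMap_congr ?_
    intro i hi
    have h : (a ++ b).getD (a.length + i) ' ' = b.getD i ' ' := by
      simp [List.getD_eq_getElem?_getD, List.getElem?_append_right (Nat.le_add_right a.length i)]
    simp only [Function.comp, h]
    rw [Nat.add_assoc]

theorem splitOff_cons (pw : List Char) (c : Char) (nd : List Char) (off : Nat) :
    pvSplitOff pw (c :: nd) off =
      (if c = 'X' then [pw.getD off ' '] else []) ++ pvSplitOff pw nd (off + 1) := by
  rw [show (c :: nd) = [c] ++ nd from rfl, splitOff_append]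
  congr 1
  simp only [pvSplitOff, List.length_singleton, List.range_one]
  by_cases hc : c = 'X' <;> simp [hc]

theorem enum_filter (pw : List Char) (xs : List Char) (off : Nat) :
    (PySem.List.enumerate xs (off : Int)).filterMap (fun p =>
      if p.2 = 'X' then some (pw.getD p.1.toNat ' ') else none) = pvSplitOff pw xs off := by
  induction xs generalizing off with
  | nil => simp [PySem.List.enumerate, pvSplitOff]
  | cons c nd ih =>
    rw [PySem.List.enumerate_cons, List.filterMap_cons, splitOff_cons]
    have h1 : ((off : Int) + 1) = ((off + 1 : Nat) : Int) := by push_cast; ring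
    rw [h1, ih (off + 1)]
    by_cases hc : c = 'X' <;> simp [hc]

theorem splitOff_row (pw : List Char) (h : Nat → Char) (C off : Nat) :
    pvSplitOff pw ((List.range C).map h) off =
      (List.range C).filterMap (fun j => if h j = 'X' then some (pw.getD (off + j) ' ') else none) := by
  unfold pvSplitOff
  rw [List.length_map, List.length_range]
  refine List.filterMap_congr ?_
  intro j hj
  have hjC : j < C := List.mem_range.mp hj
  simp [List.getD_eq_getElem?_getD, hjC]

theorem grid_flatten_length (cf : Nat → Nat → Char) (R C : Nat) :
    (pvGrid cf R C).flatten.length = R * C := by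
  induction R with
  | zero => simp [pvGrid]
  | succ R ih =>
    unfold pvGrid at *
    rw [List.range_succ, List.map_append, List.flatten_append, List.length_append, ih]
    simp [Nat.succ_mul]

theorem splitOff_grid (pw : List Char) (cf : Nat → Nat → Char) (R C off : Nat) :
    pvSplitOff pw (pvGrid cf R C).flatten off =
      (List.range R).flatMap (fun i => (List.range C).filterMap (fun j =>
        if cf i j = 'X' then some (pw.getD (off + (i * C + j)) ' ') else none)) := by
  induction R with
  | zero => simp [pvGrid, pvSplitOff]
  | succ R ih =>
    have hflen := grid_flatten_length cf R C
    have hgrid : pvGrid cf (R + 1) C =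
        pvGrid cf R C ++ [(List.range C).map (fun j => cf R j)] := by
      unfold pvGrid
      rw [List.range_succ, List.map_append]
      simp
    rw [hgrid, List.flatten_append, splitOff_append, ih, hflen]
    rw [List.range_succ, List.flatMap_append]
    congr 1
    simp only [List.flatMap_cons, List.flatMap_nil, List.append_nil, List.flatten_cons,
      List.flatten_nil]
    rw [splitOff_row]
    refine List.filterMap_congr ?_
    intro j _
    have h : off + R * C + j = off + (R * C + j) := by omega
    rw [h]

theorem split_grid_eq_pick (pw : List Char) (g : List (List Char)) (f : Nat → Nat → Nat × Nat)
    (R C : Nat) (cf : Nat → Nat → Char)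
    (hcf : ∀ i < R, ∀ j < C, cf i j = pvCell g (f i j).1 (f i j).2) :
    pvSplitA pw (pvGrid cf R C) = pvPick pw g f R C := by
  rw [splitA_eq_off, splitOff_grid]
  unfold pvPick
  refine List.flatMap_congr ?_
  intro i hi
  refine List.filterMap_congr ?_
  intro j hj
  rw [hcf i (List.mem_range.mp hi) j (List.mem_range.mp hj), Nat.zero_add]

-- ===== VERDICT (by name: the statement is the Claim_ definition above) =====
theorem recall_password_spec : Claim_equal_recall_password := by
  intro data cp _ hpre
  obtain ⟨hne, hm0, hrect, _, _⟩ := hpre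
  unfold Spec_recall_password recall_password recall_password_alt
  simp only []
  set g : List (List Char) := data.map String.toList with hg
  set pw : List Char := (cp.map String.toList).flatten with hpw
  set n : Nat := g.length with hndef
  set m : Nat := (g.headD []).length with hmdef
  -- basic facts
  have hhead : (g.headD []).length = (data.headD "").toList.length := by
    cases data with
    | nil => exact absurd rfl hne
    | cons d t => simp [hg]
  have hn0 : 0 < n := by
    cases data with
    | nil => exact absurd rfl hne
    | cons d t => simp [hndef, hg]
  have hm0' : 0 < m := by
    rw [hmdef, hhead]; omega
  -- the rotated grids as cell functions over the original grid
  have hg1 : pvRotA g = pvGrid (fun i j => pvCell g (n - 1 - j) i) m n :=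
    rotA_eq g n m rfl rfl
  have hg2 : pvRotA (pvRotA g) =
      pvGrid (fun i j => pvCell (pvGrid (fun i j => pvCell g (n - 1 - j) i) m n) (m - 1 - j) i) n m := by
    rw [hg1]
    exact rotA_eq _ m n (pvGrid_length _ _ _) (pvGrid_head _ _ _ hm0')
  have hg3 : pvRotA (pvRotA (pvRotA g)) =
      pvGrid (fun i j =>
        pvCell (pvGrid (fun i j =>
          pvCell (pvGrid (fun i j => pvCell g (n - 1 - j) i) m n) (m - 1 - j) i) n m) (n - 1 - j) i) m n := by
    rw [hg2]
    exact rotA_eq _ n m (pvGrid_length _ _ _) (pvGrid_head _ _ _ hn0)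
  -- the four split/pick agreements
  have e0 : pvSplitA pw g = (PySem.List.enumerate g.flatten (0 : Int)).filterMap (fun p =>
      if p.2 = 'X' then some (pw.getD p.1.toNat ' ') else none) := by
    rw [splitA_eq_off]
    have h := enum_filter pw g.flatten 0
    simpa using h.symm
  have e1 : pvSplitA pw (pvRotA g) = pvPick pw g (fun i j => (n - 1 - j, i)) m n := by
    rw [hg1]
    exact split_grid_eq_pick pw g _ m n _ (fun i _ j _ => rfl)
  have e2 : pvSplitA pw (pvRotA (pvRotA g)) =
      pvPick pw g (fun i j => (n - 1 - i, m - 1 - j)) n m := by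
    rw [hg2]
    refine split_grid_eq_pick pw g _ n m _ ?_
    intro i hi j hj
    rw [pvGrid_cell _ _ _ _ _ (by omega) hi]
  have e3 : pvSplitA pw (pvRotA (pvRotA (pvRotA g))) =
      pvPick pw g (fun i j => (j, m - 1 - i)) m n := by
    rw [hg3]
    refine split_grid_eq_pick pw g _ m n _ ?_
    intro i hi j hj
    rw [pvGrid_cell _ _ _ _ _ (by omega) hi, pvGrid_cell _ _ _ _ _ (by omega) (by omega)]
    have h : n - 1 - (n - 1 - j) = j := by omega
    rw [h]
  rw [e0, e1, e2, e3]
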